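-- pv_equiv track=rewrite | github.com/PrinceSinghhub/InterviewBit-Dynamic-Programming | Interview Bit Dynamic Programming/Largest Area Of Rectangle With Permutations.py | solve
-- ===== SOURCE A (Python) =====
-- def solve(A):
--     rows, cols = len(A), len(A[0])
--     for r, row in enumerate(A):
--         for c, x in enumerate(row):
--             if x == 1 and r > 0: A[r][c] = A[r - 1][c] + 1
--
--     area = 0
--     from collections import Counter
--     for row in A:  # better: cnt histogram, then sort: T(rows * cols) ???
--         length = 0
--         for height, cnt in sorted([(h, c) for h, c in Counter(row).items()], reverse = True):
--             length += cnt
--             tmp = height * length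
--             if area < tmp: area = tmp
--     return area
-- ===== SOURCE B (Python) =====
-- def solve(A):
--     # Return-value equivalent to A (A mutates its argument in place; B does not).
--     # No sorting, no Counter: for each row of accumulated heights, the best
--     # rectangle using a height h is h * (number of entries >= h), so B just
--     # counts directly for each distinct positive value in the row.
--     area = 0
--     prev = None
--     for row in A:
--         if prev is None:
--             cur = list(row)
--         else:
--             cur = [prev[c] + 1 if x == 1 else x for c, x in enumerate(row)]
--         for h in set(cur):
--             if h > 0:
--                 w = 0
--                 for y in cur:
--                     if y >= h:
--                         w += 1
--                 if area < h * w: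
--                     area = h * w
--         prev = cur
--     return area
-- ===== Notes on version B (the rewrite author's own statement) =====
-- stated objective: alternative
-- what changed: A builds a Counter per height row, sorts its (height,count) items descending and accumulates cumulative counts; B does no sorting and no Counter at all: for each distinct positive value h in the row it directly counts the entries >= h with an inner scan and takes h*count, which enumerates exactly the same candidate areas.
-- outside the precondition, e.g. on solve([]): A raises IndexError, B returns 0
import Mathlib
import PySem

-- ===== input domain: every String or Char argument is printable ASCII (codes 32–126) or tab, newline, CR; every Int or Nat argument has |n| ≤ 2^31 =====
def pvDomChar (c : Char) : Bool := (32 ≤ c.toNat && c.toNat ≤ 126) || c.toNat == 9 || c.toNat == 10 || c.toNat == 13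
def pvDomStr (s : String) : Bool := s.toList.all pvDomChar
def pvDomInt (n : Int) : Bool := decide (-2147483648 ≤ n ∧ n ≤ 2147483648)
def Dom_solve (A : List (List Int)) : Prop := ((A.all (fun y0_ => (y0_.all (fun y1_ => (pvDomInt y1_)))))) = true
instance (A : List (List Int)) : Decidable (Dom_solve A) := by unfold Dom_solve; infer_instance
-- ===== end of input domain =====

-- B replaces A's per-row Counter + descending sort of (height,count) items by a sort-free
-- direct count: for each distinct positive value h of the row it counts the entries >= h
-- with an inner scan and takes h*count (objective: alternative; no sorting at all).
-- A mutates its argument in place; the equivalence proved here is about the RETURN value only.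

-- ===== PORT A =====
-- for c, x in enumerate(row): if x == 1 and r > 0: A[r][c] = A[r-1][c] + 1
-- (in-place assignment modelled by rebuilding the row left to right; A[r-1][c] is the
-- already-updated previous row; .getD 0 is unreachable inside Pre_solve, where Python
-- does not raise IndexError)
def rowPassA (prev row : List Int) : List Int :=
  (PySem.List.enumerate row 0).foldl
    (fun acc p =>
      if p.2 = 1 then acc ++ [(PySem.List.pyGet? prev p.1).getD 0 + 1] else acc ++ [p.2]) []

-- the first pass over all rows r = 1, 2, … (row 0 is unchanged since r > 0 fails)
def matPassA (prev : List Int) : List (List Int) → List (List Int)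
  | [] => []
  | row :: rest =>
      let nr := rowPassA prev row
      nr :: matPassA nr rest

-- for height, cnt in sorted([(h,c) for h,c in Counter(row).items()], reverse=True):
--   length += cnt; tmp = height * length; if area < tmp: area = tmp
-- (Counter keys are distinct, so Python's descending tuple sort is exactly the
-- descending sort by the first component, ported with key (·.1))
def rowLoopA (area : Int) (row : List Int) : Int :=
  let s := PySem.List.sorted ((PySem.Dict.counter row).items) (fun p => p.1) true
  (s.foldl
    (fun (st : Int × Int) p =>
      let length := st.1 + p.2
      let tmp := p.1 * length
      (length, if st.2 < tmp then tmp else st.2)) ((0 : Int), area)).2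

-- rows, cols = len(A), len(A[0]) : cols is never used; A[0] raises IndexError on [],
-- which Pre_solve excludes, so the port does not read it
def solve (A : List (List Int)) : Int :=
  let M := match A with
    | [] => []
    | r0 :: rest => r0 :: matPassA r0 rest
  M.foldl rowLoopA 0

-- ===== PORT B =====
-- cur = [prev[c] + 1 if x == 1 else x for c, x in enumerate(row)]
def rowPassB (prev row : List Int) : List Int :=
  (PySem.List.enumerate row 0).map
    (fun p => if p.2 = 1 then (PySem.List.pyGet? prev p.1).getD 0 + 1 else p.2)

-- w = 0; for y in cur: if y >= h: w += 1
def cntFold (cur : List Int) (h : Int) : Int :=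
  cur.foldl (fun w y => if h ≤ y then w + 1 else w) 0

-- for h in set(cur): if h > 0: w = …; if area < h*w: area = h*w
-- (the result is a running max, so Python's set iteration order is irrelevant)
def rowBestB (area : Int) (cur : List Int) : Int :=
  (PySem.Set.ofList cur).foldl
    (fun a h =>
      if 0 < h then
        let w := cntFold cur h
        if a < h * w then h * w else a
      else a) area

-- the single streaming loop; prev is None before the first row
def goB (area : Int) (prev : Option (List Int)) : List (List Int) → Int
  | [] => area
  | row :: rest =>
      let cur := match prev with
        | none => row
        | some pr => rowPassB pr row
      goB (rowBestB area cur) (some cur) rest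

def solve_alt (A : List (List Int)) : Int := goB 0 none A

-- ===== PRECONDITION & SPEC =====
-- Exactly the inputs on which Python A returns: A raises IndexError on [] (it reads
-- A[0]) and whenever some row r > 0 has an original entry 1 at a column c beyond the
-- length of row r-1 (it reads A[r-1][c]); nothing else is excluded.
def Pre_solve (A : List (List Int)) : Prop :=
  A ≠ [] ∧
  ∀ i < A.length, 0 < i →
    ∀ c < (A.getD i []).length,
      (A.getD i []).getD c 0 = 1 → c < (A.getD (i - 1) []).length

instance (A : List (List Int)) : Decidable (Pre_solve A) := by unfold Pre_solve; infer_instance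

def pvWitness_solve : List (List Int) := [[1, 0, 1], [1, 1, 0], [0, 1, 1]]

def Spec_solve (A : List (List Int)) (out : Int) : Prop := out = solve_alt A
instance (A : List (List Int)) (out : Int) : Decidable (Spec_solve A out) := by unfold Spec_solve; infer_instance

-- ===== CLAIM (what is proved, stated in full; the proofs are below) =====
def Claim_equal_solve : Prop := ∀ (A : List (List Int)), Dom_solve A → Pre_solve A → Spec_solve A (solve A)

-- ===== LEMMAS AND PROOFS =====

-- generic max-fold facts
theorem le_foldl_max : ∀ (l : List Int) (a : Int), a ≤ l.foldl max a
  | [], a => le_refl a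
  | x :: t, a => le_trans (le_max_left a x) (le_foldl_max t (max a x))

theorem mem_le_foldl_max : ∀ (l : List Int) (a x : Int), x ∈ l → x ≤ l.foldl max a := by
  intro l
  induction l with
  | nil => intro a x hx; cases hx
  | cons y t ih =>
      intro a x hx
      rcases List.mem_cons.mp hx with rfl | hx
      · exact le_trans (le_max_right a x) (le_foldl_max t (max a x))
      · exact ih (max a y) x hx

theorem foldl_max_le : ∀ (l : List Int) (a b : Int), a ≤ b → (∀ x ∈ l, x ≤ b) →
    l.foldl max a ≤ b := by
  intro l
  induction l with
  | nil => intro a b hab _; exact hab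
  | cons y t ih =>
      intro a b hab hall
      exact ih (max a y) b (max_le hab (hall y (by simp))) (fun x hx => hall x (by simp [hx]))

-- the two first-pass row transforms agree (A appends left to right, B maps)
theorem foldl_two_append {α β : Type} (cond : α → Bool) (u v : α → β) :
    ∀ (l : List α) (acc : List β),
      l.foldl (fun acc x => if cond x then acc ++ [u x] else acc ++ [v x]) acc
        = acc ++ l.map (fun x => if cond x then u x else v x) := by
  intro l
  induction l with
  | nil => intro acc; simp
  | cons x t ih =>
      intro acc
      by_cases hx : cond x <;> simp [hx, ih, List.append_assoc]

theorem rowPassA_eq_rowPassB (prev row : List Int) : rowPassA prev row = rowPassB prev row := by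
  unfold rowPassA rowPassB
  have := foldl_two_append (fun p : Int × Int => decide (p.2 = 1))
    (fun p => (PySem.List.pyGet? prev p.1).getD 0 + 1) (fun p => p.2)
    (PySem.List.enumerate row 0) []
  simpa using this

-- candidate lists of A's inner loop and of a descending prefix scan
def candA : List (Int × Int) → Int → List Int
  | [], _ => []
  | p :: t, n => p.1 * (n + p.2) :: candA t (n + p.2)

def candB : List Int → Int → List Int
  | [], _ => []
  | h :: t, n => h * (n + 1) :: candB t (n + 1)

theorem loopA_eq : ∀ (s : List (Int × Int)) (n area : Int),
    (s.foldl (fun (st : Int × Int) p =>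
        let length := st.1 + p.2
        let tmp := p.1 * length
        (length, if st.2 < tmp then tmp else st.2)) (n, area)).2
      = (candA s n).foldl max area := by
  intro s
  induction s with
  | nil => intro n area; rfl
  | cons p t ih =>
      intro n area
      have hmax : (if area < p.1 * (n + p.2) then p.1 * (n + p.2) else area)
          = max area (p.1 * (n + p.2)) := by omega
      simp only [List.foldl_cons, candA]
      rw [show (let length := n + p.2; let tmp := p.1 * length;
            ((length, if area < tmp then tmp else area) : Int × Int))
          = (n + p.2, max area (p.1 * (n + p.2))) by simp [hmax]]
      exact ih (n + p.2) (max area (p.1 * (n + p.2)))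

theorem rowLoopA_eq_foldl_max (area : Int) (row : List Int) :
    rowLoopA area row =
      (candA (PySem.List.sorted ((PySem.Dict.counter row).items) (fun p => p.1) true) 0).foldl max area := by
  unfold rowLoopA
  exact loopA_eq _ 0 area

theorem candB_append : ∀ (xs ys : List Int) (n : Int),
    candB (xs ++ ys) n = candB xs n ++ candB ys (n + xs.length) := by
  intro xs
  induction xs with
  | nil => intro ys n; simp [candB]
  | cons x t ih =>
      intro ys n
      simp only [List.cons_append, candB, ih, List.length_cons]
      have harr : n + 1 + (t.length : Int) = n + ((t.length + 1 : Nat) : Int) := by push_cast; ring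
      rw [harr]

-- a block of k equal heights h starting at width n contributes max area (h*(n+k))
theorem foldl_max_replicate (h : Int) :
    ∀ (k : Nat) (n area : Int), 1 ≤ k → 0 ≤ n → 0 ≤ area →
      (candB (List.replicate k h) n).foldl max area = max area (h * (n + k)) := by
  intro k
  induction k with
  | zero => intro n area hk; omega
  | succ k ih =>
      intro n area _ hn harea
      by_cases hk : 1 ≤ k
      · have : List.replicate (k + 1) h = h :: List.replicate k h := rfl
        rw [this]
        simp only [candB, List.foldl_cons]
        rw [ih (n + 1) (max area (h * (n + 1))) hk (by omega) (le_trans harea (le_max_left _ _))]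
        have hcast : ((k : Int) + 1) = ((k + 1 : Nat) : Int) := by push_cast; ring
        have harr : n + 1 + (k : Int) = n + ((k + 1 : Nat) : Int) := by push_cast; ring
        rw [harr]
        have key : h * (n + 1) ≤ max area (h * (n + ((k + 1 : Nat) : Int))) := by
          by_cases hpos : 0 ≤ h
          · refine le_trans ?_ (le_max_right _ _)
            have : (n + 1 : Int) ≤ n + ((k + 1 : Nat) : Int) := by push_cast; omega
            exact mul_le_mul_of_nonneg_left this hpos
          · refine le_trans ?_ (le_max_left _ _)
            have : h * (n + 1) < 0 := mul_neg_of_neg_of_pos (by omega) (by omega)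
            omega
        refine le_antisymm (max_le (max_le ?_ ?_) ?_) (max_le ?_ ?_)
        · exact le_max_left _ _
        · exact key
        · exact le_max_right _ _
        · exact le_trans (le_max_left _ _) (le_max_left _ _)
        · exact le_max_right _ _
      · have hk0 : k = 0 := by omega
        subst hk0
        simp [candB]

-- A's (height, count) scan and an indexed scan over the expanded blocks give the same max
theorem candAB : ∀ (ps : List (Int × Int)) (n area : Int), 0 ≤ n → 0 ≤ area →
    (∀ p ∈ ps, 1 ≤ p.2) →
    (candA ps n).foldl max area
      = (candB (ps.flatMap fun p => List.replicate p.2.toNat p.1) n).foldl max area := by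
  intro ps
  induction ps with
  | nil => intro n area _ _ _; simp [candA, candB]
  | cons p t ih =>
      intro n area hn harea hcnt
      have hp : 1 ≤ p.2 := hcnt p (by simp)
      have hcast : ((p.2.toNat : Nat) : Int) = p.2 := Int.toNat_of_nonneg (by omega)
      rw [List.flatMap_cons, candB_append, List.foldl_append,
        foldl_max_replicate p.1 p.2.toNat n area (by omega) hn harea,
        List.length_replicate, hcast]
      simp only [candA, List.foldl_cons]
      exact ih (n + p.2) (max area (p.1 * (n + p.2))) (by omega)
        (le_trans harea (le_max_left _ _)) (fun q hq => hcnt q (by simp [hq]))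

-- counting helper: in a nodup list only the block of a contributes
theorem sum_ite_nodup (a : Int) (m : Int → Nat) :
    ∀ ks : List Int, ks.Nodup →
      (ks.map (fun k => if k = a then m k else 0)).sum = if a ∈ ks then m a else 0 := by
  intro ks
  induction ks with
  | nil => intro _; simp
  | cons k t ih =>
      intro hnd
      rcases List.nodup_cons.mp hnd with ⟨hk, ht⟩
      by_cases hka : k = a
      · subst hka
        simp [ih ht, hk]
      · simp [hka, ih ht, Ne.symm hka]

theorem count_flatMap_replicate (a : Int) (m : Int → Nat) :
    ∀ ks : List Int,
      List.count a (ks.flatMap fun k => List.replicate (m k) k)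
        = (ks.map (fun k => if k = a then m k else 0)).sum := by
  intro ks
  induction ks with
  | nil => simp
  | cons k t ih =>
      simp only [List.flatMap_cons, List.count_append, ih, List.count_replicate,
        List.map_cons, List.sum_cons]
      by_cases hka : k = a <;> simp [hka]

theorem flatMap_replicate_perm (l : List Int) :
    ((PySem.Set.ofList l).flatMap (fun k => List.replicate (l.count k) k)).Perm l := by
  rw [List.perm_iff_count]
  intro a
  rw [count_flatMap_replicate a (fun k => l.count k) (PySem.Set.ofList l),
    sum_ite_nodup a _ _ (PySem.Set.nodup_ofList l)]
  by_cases ha : a ∈ l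
  · simp [PySem.Set.mem_ofList, ha]
  · simp [PySem.Set.mem_ofList, ha, List.count_eq_zero.mpr ha]

-- expanding strictly-decreasing (height, count) pairs gives a descending list
theorem pairwise_ge_flatMap :
    ∀ (ps : List (Int × Int)), ps.Pairwise (fun p q => q.1 < p.1) →
      (ps.flatMap fun p => List.replicate p.2.toNat p.1).Pairwise (fun a b : Int => b ≤ a) := by
  intro ps
  induction ps with
  | nil => intro _; simp
  | cons p t ih =>
      intro hp
      rcases List.pairwise_cons.mp hp with ⟨hhead, htail⟩
      rw [List.flatMap_cons, List.pairwise_append]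
      refine ⟨List.pairwise_replicate.mpr (Or.inr (le_refl _)), ih htail, ?_⟩
      intro x hx y hy
      rcases List.mem_flatMap.mp hy with ⟨q, hq, hyq⟩
      rw [List.eq_of_mem_replicate hx, List.eq_of_mem_replicate hyq]
      exact le_of_lt (hhead q hq)

-- sorted(row, reverse=True) is the expansion of the descending (height, count) items
theorem desc_eq_flatMap (row : List Int) :
    PySem.List.sorted row (fun x => x) true
      = (PySem.List.sorted ((PySem.Dict.counter row).items) (fun p => p.1) true).flatMap
          (fun p => List.replicate p.2.toNat p.1) := by
  have hperm_pairs : (PySem.List.sorted ((PySem.Dict.counter row).items) (fun p => p.1) true).Perm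
      ((PySem.Dict.counter row).items) := PySem.List.sorted_perm _ _ _
  have hnodup : ((PySem.List.sorted ((PySem.Dict.counter row).items) (fun p => p.1) true).map
      (fun p => p.1)).Nodup := by
    refine ((hperm_pairs.map (fun p => p.1)).symm).nodup ?_
    rw [PySem.Dict.items_counter, List.map_map]
    have : ((fun p : Int × Int => p.1) ∘ fun k : Int => (k, (List.count k row : Int))) = id := rfl
    rw [this, List.map_id]
    exact PySem.Set.nodup_ofList row
  have hlt : (PySem.List.sorted ((PySem.Dict.counter row).items) (fun p => p.1) true).Pairwise
      (fun p q => q.1 < p.1) := by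
    have h1 := PySem.List.sorted_pairwise_rev ((PySem.Dict.counter row).items) (fun p => p.1)
    refine (h1.and (List.pairwise_map.mp hnodup)).imp ?_
    rintro p q ⟨hle, hne⟩
    exact lt_of_le_of_ne hle (Ne.symm hne)
  have hperm : ((PySem.List.sorted ((PySem.Dict.counter row).items) (fun p => p.1) true).flatMap
      (fun p => List.replicate p.2.toNat p.1)).Perm row := by
    refine List.Perm.trans (hperm_pairs.flatMap (fun _ _ => List.Perm.refl _)) ?_
    rw [PySem.Dict.items_counter, List.flatMap_map]
    simpa using flatMap_replicate_perm row
  refine List.Perm.eq_of_pairwise (le := fun a b : Int => b ≤ a)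
    (fun a b _ _ h1 h2 => le_antisymm h2 h1) ?_ ?_ ?_
  · exact PySem.List.sorted_pairwise_rev row (fun x => x)
  · exact pairwise_ge_flatMap _ hlt
  · exact ((PySem.List.sorted_perm row _ true)).trans hperm.symm

theorem counts_pos (row : List Int) :
    ∀ p ∈ PySem.List.sorted ((PySem.Dict.counter row).items) (fun p => p.1) true, 1 ≤ p.2 := by
  intro p hp
  have := (PySem.List.mem_sorted _ _ _ p).mp hp
  rw [PySem.Dict.items_counter] at this
  rcases List.mem_map.mp this with ⟨k, hk, rfl⟩
  have hkrow : k ∈ row := (PySem.Set.mem_ofList row k).mp hk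
  have h1 : 1 ≤ row.count k := List.count_pos_iff.mpr hkrow
  simpa using h1

-- ========== B-side characterisation ==========

-- number of entries ≥ h as a filter length
theorem cntFold_eq : ∀ (cur : List Int) (h w : Int),
    cur.foldl (fun w y => if h ≤ y then w + 1 else w) w
      = w + ((cur.filter (fun y => decide (h ≤ y))).length : Int) := by
  intro cur h
  induction cur with
  | nil => intro w; simp
  | cons y t ih =>
      intro w
      by_cases hy : h ≤ y
      · simp only [List.foldl_cons, if_pos hy, List.filter_cons, decide_eq_true hy,
          if_pos rfl, ih]
        push_cast [List.length_cons]
        ring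
      · simp only [List.foldl_cons, if_neg hy, List.filter_cons, decide_eq_false hy,
          Bool.false_eq_true, if_false, ih]

theorem cntFold_filter (cur : List Int) (h : Int) :
    cntFold cur h = ((cur.filter (fun y => decide (h ≤ y))).length : Int) := by
  unfold cntFold
  simpa using cntFold_eq cur h 0

-- B's guarded fold as a foldl max over the candidate list
theorem rowBestB_eq_foldl_max (area : Int) (cur : List Int) :
    rowBestB area cur
      = (((PySem.Set.ofList cur).filter (fun h => decide (0 < h))).map
          (fun h => h * cntFold cur h)).foldl max area := by
  unfold rowBestB
  generalize (PySem.Set.ofList cur) = l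
  induction l generalizing area with
  | nil => rfl
  | cons h t ih =>
      by_cases hh : 0 < h
      · have hmax : (if area < h * cntFold cur h then h * cntFold cur h else area)
            = max area (h * cntFold cur h) := by omega
        simp only [List.foldl_cons, List.filter_cons, decide_eq_true hh, if_pos rfl,
          if_pos hh, List.map_cons, hmax]
        exact ih (max area (h * cntFold cur h))
      · simp only [List.foldl_cons, List.filter_cons, if_neg hh, decide_eq_false hh,
          Bool.false_eq_true, if_false]
        exact ih area

-- forward: every prefix candidate of a descending list is ≤ 0 or dominated by some h*count(≥h)
theorem candB_bound : ∀ (l : List Int), l.Pairwise (fun a b : Int => b ≤ a) →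
    ∀ (n : Int), 0 ≤ n → ∀ x ∈ candB l n,
      x ≤ 0 ∨ ∃ h ∈ l, 0 < h ∧ x ≤ h * (n + ((l.filter (fun y => decide (h ≤ y))).length : Int)) := by
  intro l
  induction l with
  | nil => intro _ n _ x hx; cases hx
  | cons a t ih =>
      intro hp n hn x hx
      rcases List.pairwise_cons.mp hp with ⟨hhead, htail⟩
      rcases List.mem_cons.mp hx with rfl | hx
      · by_cases ha : 0 < a
        · refine Or.inr ⟨a, by simp, ha, ?_⟩
          have hfa : (a :: t).filter (fun y => decide (a ≤ y))
              = a :: t.filter (fun y => decide (a ≤ y)) := by simp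
          rw [hfa]
          have h1 : (1 : Int) ≤ ((t.filter (fun y => decide (a ≤ y))).length + 1 : Nat) := by
            push_cast; omega
          refine mul_le_mul_of_nonneg_left ?_ (le_of_lt ha)
          simp only [List.length_cons]
          push_cast; omega
        · exact Or.inl (mul_nonpos_iff.mpr (Or.inr ⟨by omega, by omega⟩))
      · rcases ih htail (n + 1) (by omega) x hx with hle | ⟨h, hht, hpos, hbound⟩
        · exact Or.inl hle
        · refine Or.inr ⟨h, by simp [hht], hpos, ?_⟩
          have hha : h ≤ a := hhead h hht
          have hfa : (a :: t).filter (fun y => decide (h ≤ y))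
              = a :: t.filter (fun y => decide (h ≤ y)) := by simp [hha]
          rw [hfa]
          have harg : (n + ((a :: t.filter (fun y => decide (h ≤ y))).length : Int))
              = (n + 1 + ((t.filter (fun y => decide (h ≤ y))).length : Int)) := by
            simp only [List.length_cons]; push_cast; ring
          rw [harg]
          exact hbound

-- reverse: for a positive h occurring ≥-often, some prefix candidate dominates h*count(≥h)
theorem exists_candB_ge : ∀ (l : List Int), l.Pairwise (fun a b : Int => b ≤ a) →
    ∀ (n : Int), 0 ≤ n → ∀ (h : Int), 0 < h →
      1 ≤ (l.filter (fun y => decide (h ≤ y))).length →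
      ∃ x ∈ candB l n, h * (n + ((l.filter (fun y => decide (h ≤ y))).length : Int)) ≤ x := by
  intro l
  induction l with
  | nil => intro _ n _ h _ hlen; simp at hlen
  | cons a t ih =>
      intro hp n hn h hpos hlen
      rcases List.pairwise_cons.mp hp with ⟨hhead, htail⟩
      by_cases hha : h ≤ a
      · have hfa : (a :: t).filter (fun y => decide (h ≤ y))
            = a :: t.filter (fun y => decide (h ≤ y)) := by simp [hha]
        by_cases ht1 : 1 ≤ (t.filter (fun y => decide (h ≤ y))).length
        · rcases ih htail (n + 1) (by omega) h hpos ht1 with ⟨x, hxmem, hxge⟩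
          refine ⟨x, by simp [candB, hxmem], ?_⟩
          have : h * (n + (((a :: t).filter (fun y => decide (h ≤ y))).length : Int))
              = h * (n + 1 + ((t.filter (fun y => decide (h ≤ y))).length : Int)) := by
            rw [hfa]; simp only [List.length_cons]; push_cast; ring
          rw [this]; exact hxge
        · have ht0 : (t.filter (fun y => decide (h ≤ y))).length = 0 := by omega
          refine ⟨a * (n + 1), by simp [candB], ?_⟩
          have : (((a :: t).filter (fun y => decide (h ≤ y))).length : Int) = 1 := by
            rw [hfa]; simp [ht0]
          rw [this]
          exact mul_le_mul_of_nonneg_right hha (by omega)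
      · exfalso
        have hfe : (a :: t).filter (fun y => decide (h ≤ y)) = [] := by
          rw [List.filter_eq_nil_iff]
          intro y hy
          rcases List.mem_cons.mp hy with rfl | hy
          · simpa using hha
          · have : y ≤ a := hhead y hy
            simp; omega
        rw [hfe] at hlen
        simp at hlen

-- the per-row loops agree: A's sorted Counter scan and B's direct counting
theorem per_row_eq (area : Int) (h0 : 0 ≤ area) (row : List Int) :
    rowLoopA area row = rowBestB area row := by
  rw [rowLoopA_eq_foldl_max,
    candAB _ 0 area (le_refl 0) h0 (counts_pos row),
    ← desc_eq_flatMap, rowBestB_eq_foldl_max]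
  simp only [cntFold_filter]
  have hpair : (PySem.List.sorted row (fun x => x) true).Pairwise (fun a b : Int => b ≤ a) :=
    PySem.List.sorted_pairwise_rev row (fun x => x)
  have hperm : (PySem.List.sorted row (fun x => x) true).Perm row :=
    PySem.List.sorted_perm row (fun x => x) true
  have hcnt : ∀ (h : Int),
      (((PySem.List.sorted row (fun x => x) true).filter (fun y => decide (h ≤ y))).length : Int)
        = ((row.filter (fun y => decide (h ≤ y))).length : Int) := by
    intro h
    have hn := (hperm.filter (fun y => decide (h ≤ y))).length_eq
    exact_mod_cast hn
  refine le_antisymm ?_ ?_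
  · refine foldl_max_le _ area _ (le_foldl_max _ area) ?_
    intro x hx
    rcases candB_bound _ hpair 0 (le_refl 0) x hx with hle | ⟨h, hmem, hpos, hb⟩
    · exact le_trans hle (le_trans h0 (le_foldl_max _ area))
    · rw [zero_add, hcnt h] at hb
      refine le_trans hb (mem_le_foldl_max _ area _ ?_)
      refine List.mem_map.mpr ⟨h, ?_, rfl⟩
      refine List.mem_filter.mpr ⟨?_, by simpa using hpos⟩
      exact (PySem.Set.mem_ofList row h).mpr (hperm.mem_iff.mp hmem)
  · refine foldl_max_le _ area _ (le_foldl_max _ area) ?_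
    intro y hy
    rcases List.mem_map.mp hy with ⟨h, hmem, rfl⟩
    rcases List.mem_filter.mp hmem with ⟨hset, hposb⟩
    have hpos : (0 : Int) < h := by simpa using hposb
    have hrow : h ∈ row := (PySem.Set.mem_ofList row h).mp hset
    have hdesc : h ∈ PySem.List.sorted row (fun x => x) true := hperm.mem_iff.mpr hrow
    have hlen : 1 ≤ ((PySem.List.sorted row (fun x => x) true).filter
        (fun y => decide (h ≤ y))).length := by
      have : h ∈ (PySem.List.sorted row (fun x => x) true).filter (fun y => decide (h ≤ y)) :=
        List.mem_filter.mpr ⟨hdesc, by simp⟩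
      exact List.length_pos_of_mem this
    rcases exists_candB_ge _ hpair 0 (le_refl 0) h hpos hlen with ⟨x, hxmem, hxge⟩
    rw [zero_add, hcnt h] at hxge
    exact le_trans hxge (mem_le_foldl_max _ area x hxmem)

theorem le_rowBestB (area : Int) (row : List Int) : area ≤ rowBestB area row := by
  rw [rowBestB_eq_foldl_max]
  exact le_foldl_max _ area

-- the streaming pass of B equals folding A's per-row loop over A's transformed rows
theorem goB_eq : ∀ (rest : List (List Int)) (prev : List Int) (area : Int), 0 ≤ area →
    goB area (some prev) rest = (matPassA prev rest).foldl rowLoopA area := by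
  intro rest
  induction rest with
  | nil => intro prev area _; rfl
  | cons row t ih =>
      intro prev area harea
      simp only [goB, matPassA, List.foldl_cons]
      rw [← rowPassA_eq_rowPassB prev row, per_row_eq area harea (rowPassA prev row)]
      exact (ih (rowPassA prev row) (rowBestB area (rowPassA prev row))
        (le_trans harea (le_rowBestB _ _))).symm ▸ rfl

-- ===== VERDICT (by name: the statement is the Claim_ definition above) =====
theorem solve_spec : Claim_equal_solve := by
  intro A _ hPre
  unfold Spec_solve solve solve_alt
  match A with
  | [] => exact absurd rfl hPre.1
  | r0 :: rest =>
      simp only [goB, List.foldl_cons]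
      rw [goB_eq rest r0 (rowBestB 0 r0) (le_rowBestB 0 r0), per_row_eq 0 (le_refl 0) r0]
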